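-- pv_equiv track=rewrite | github.com/intenseclouding/ecomm-review-agent-en | lab01_review_sentiment_analyzer/streamlit_app.py | generate_stars_html
-- ===== SOURCE A (Python) =====
-- def generate_stars_html(rating):
--     """Generate star rating HTML"""
--     stars = ""
--     for i in range(5):
--         if i < rating:
--             stars += '<span style="color: #fbbf24; font-size: 18px;">★</span>'
--         else:
--             stars += '<span style="color: #d1d5db; font-size: 18px;">★</span>'
--     return stars
-- ===== SOURCE B (Python) =====
-- GOLD = '<span style="color: #fbbf24; font-size: 18px;">★</span>'
-- GRAY = '<span style="color: #d1d5db; font-size: 18px;">★</span>'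
--
--
-- def generate_stars_html(rating):
--     """Generate star rating HTML"""
--     filled = sum(1 for i in range(5) if i < rating)
--     return GOLD * filled + GRAY * (5 - filled)
-- ===== Notes on version B (the rewrite author's own statement) =====
-- stated objective: simpler
-- what changed: Replaces the branch-in-loop string appending with a counting pass (filled = number of i in range(5) with i < rating) followed by string repetition GOLD*filled + GRAY*(5-filled).
import Mathlib
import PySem

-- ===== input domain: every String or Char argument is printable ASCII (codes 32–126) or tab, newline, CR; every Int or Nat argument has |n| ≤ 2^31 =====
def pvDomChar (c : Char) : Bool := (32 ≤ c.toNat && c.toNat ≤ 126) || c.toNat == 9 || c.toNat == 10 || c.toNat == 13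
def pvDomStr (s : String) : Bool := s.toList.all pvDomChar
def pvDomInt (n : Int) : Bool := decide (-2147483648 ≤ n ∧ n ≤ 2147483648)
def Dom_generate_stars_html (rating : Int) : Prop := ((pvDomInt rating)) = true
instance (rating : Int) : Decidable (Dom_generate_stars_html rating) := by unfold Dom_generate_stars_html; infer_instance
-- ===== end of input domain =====

-- B replaces the branch-in-loop string appending with a counting pass plus string repetition (objective: simpler).

-- ===== PORT A =====
-- the two span literals (shared context of both ports)
def pvGold : String := "<span style=\"color: #fbbf24; font-size: 18px;\">★</span>"
def pvGray : String := "<span style=\"color: #d1d5db; font-size: 18px;\">★</span>"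

def generate_stars_html (rating : Int) : String :=
  (PySem.List.pyRange 0 5 1).foldl
    (fun stars i => if i < rating then stars ++ pvGold else stars ++ pvGray) ""

-- ===== PORT B =====
-- python's  s * n  for a string and a non-negative int
def pvStrMul (s : String) (n : Int) : String := String.join (List.replicate n.toNat s)

def generate_stars_html_alt (rating : Int) : String :=
  let filled : Int :=
    (PySem.List.pyRange 0 5 1).foldl (fun acc i => if i < rating then acc + 1 else acc) 0
  pvStrMul pvGold filled ++ pvStrMul pvGray (5 - filled)

-- ===== PRECONDITION & SPEC =====
def Spec_generate_stars_html (rating : Int) (out : String) : Prop := out = generate_stars_html_alt rating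
instance (rating : Int) (out : String) : Decidable (Spec_generate_stars_html rating out) := by unfold Spec_generate_stars_html; infer_instance

-- ===== CLAIM (what is proved, stated in full; the proofs are below) =====
def Claim_equal_generate_stars_html : Prop := ∀ (rating : Int), Dom_generate_stars_html rating → Spec_generate_stars_html rating (generate_stars_html rating)

-- ===== LEMMAS AND PROOFS =====

-- ===== VERDICT (by name: the statement is the Claim_ definition above) =====
set_option maxRecDepth 4000 in
theorem generate_stars_html_spec : Claim_equal_generate_stars_html := by
  intro rating _
  unfold Spec_generate_stars_html generate_stars_html generate_stars_html_alt
  have h5 : PySem.List.pyRange 0 5 1 = [0, 1, 2, 3, 4] := by decide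
  rw [h5]
  simp only [List.foldl]
  split_ifs with h0 h1 h2 h3 h4 <;> first | rfl | omega
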